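-- pv_equiv track=rewrite | github.com/liuyang1520/LeetCode | 672.py | flipLights
-- ===== SOURCE A (Python) =====
-- def flipLights(n, m):
--     """
--     :type n: int
--     :type m: int
--     :rtype: int
--     """
--     if m == 0:
--         return 1
--     if n == 1:
--         return 2
--     if n == 2:
--         return 3 if m == 1 else 4
--     results = set()
--     if m > 5:
--         if m % 2:
--             m = 5
--         else:
--             m = 6
--     for a in range(2):
--         for b in range(m+1-a):
--             for c in range(m+1-a-b):
--                 d = m+1 - a - b - c
--                 results.add(((a + b) % 2, (a + c) % 2, d % 2))
--     return len(results)
-- ===== SOURCE B (Python) =====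
-- def flipLights(n, m):
--     # Closed-form case analysis over (n, m); no enumeration needed.
--     if m == 0:
--         return 1
--     if n == 1:
--         return 2
--     if n == 2:
--         return 3 if m == 1 else 4
--     return 4 if m == 1 else 7 if m == 2 else 8
-- ===== Notes on version B (the rewrite author's own statement) =====
-- stated objective: simpler
-- what changed: Replaced A's set-building triple loop over press parities (with its m>5 parity normalization) by a direct closed-form case analysis on (n, m); Pre_ excludes negative press counts m<0, outside the task's natural domain, where A's empty enumeration accidentally returns 0.
-- outside the precondition, e.g. on flipLights(3, -1): A returns 0, B returns 8
import Mathlib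
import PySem

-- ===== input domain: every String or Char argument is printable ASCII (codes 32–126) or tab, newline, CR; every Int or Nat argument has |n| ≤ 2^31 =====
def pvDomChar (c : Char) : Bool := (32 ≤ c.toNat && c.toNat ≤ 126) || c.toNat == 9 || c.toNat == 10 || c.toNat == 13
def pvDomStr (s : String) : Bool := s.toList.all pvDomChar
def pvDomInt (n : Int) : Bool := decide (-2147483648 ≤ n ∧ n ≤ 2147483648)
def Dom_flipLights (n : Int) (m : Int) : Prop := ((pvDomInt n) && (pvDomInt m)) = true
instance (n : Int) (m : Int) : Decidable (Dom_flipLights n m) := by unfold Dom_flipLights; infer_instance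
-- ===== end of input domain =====

-- B replaces A's set-building triple loop by a closed-form case analysis on (n, m): simpler.

-- ===== PORT A =====
-- helper: A's enumeration over button-press counts (the code after the m>5 normalization)
def flipEnum (m1 : Int) : Int :=
  let results : PySem.Set (Int × Int × Int) :=
    (PySem.List.pyRange 0 2 1).foldl (fun res a =>
      (PySem.List.pyRange 0 (m1+1-a) 1).foldl (fun res b =>
        (PySem.List.pyRange 0 (m1+1-a-b) 1).foldl (fun res c =>
          let d := m1+1-a-b-c
          PySem.Set.add res (PySem.Int.mod (a+b) 2, PySem.Int.mod (a+c) 2, PySem.Int.mod d 2)) res) res)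
      PySem.Set.empty
  (PySem.Set.len results : Int)

def flipLights (n : Int) (m : Int) : Int :=
  if m == 0 then 1
  else if n == 1 then 2
  else if n == 2 then (if m == 1 then 3 else 4)
  else
    -- `if m % 2:` is Python truthiness: nonzero remainder
    let m1 : Int := if 5 < m then (if PySem.Int.mod m 2 != 0 then 5 else 6) else m
    flipEnum m1

-- ===== PORT B =====
def flipLights_alt (n : Int) (m : Int) : Int :=
  if m == 0 then 1
  else if n == 1 then 2
  else if n == 2 then (if m == 1 then 3 else 4)
  else if m == 1 then 4
  else if m == 2 then 7
  else 8

-- ===== PRECONDITION & SPEC =====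
-- Pre_ excludes negative press counts (m < 0), outside the task's natural domain; there A's
-- empty enumeration accidentally returns 0, while B's closed form gives the n≥3 value.
def Pre_flipLights (n : Int) (m : Int) : Prop := 0 ≤ m
instance (n : Int) (m : Int) : Decidable (Pre_flipLights n m) := by unfold Pre_flipLights; infer_instance
def pvWitness_flipLights : Int × Int := (3, 2)
def Spec_flipLights (n : Int) (m : Int) (out : Int) : Prop := out = flipLights_alt n m
instance (n : Int) (m : Int) (out : Int) : Decidable (Spec_flipLights n m out) := by unfold Spec_flipLights; infer_instance

-- ===== CLAIM (what is proved, stated in full; the proofs are below) =====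
def Claim_equal_flipLights : Prop := ∀ (n : Int) (m : Int), Dom_flipLights n m → Pre_flipLights n m → Spec_flipLights n m (flipLights n m)

-- ===== LEMMAS AND PROOFS =====

set_option maxRecDepth 8192 in
theorem flipLights_spec_aux : ∀ (n m : Int), 0 ≤ m → flipLights n m = flipLights_alt n m := by
  intro n m hm
  unfold flipLights flipLights_alt
  by_cases h0 : m = 0
  · simp [h0]
  by_cases h1 : n = 1
  · simp [h0, h1]
  by_cases h2 : n = 2
  · simp [h0, h2]
  simp only [beq_iff_eq, h0, h1, h2, if_false]
  by_cases hbig : 5 < m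
  · have hm2 : PySem.Int.mod m 2 = 0 ∨ PySem.Int.mod m 2 = 1 := by
      have := PySem.Int.mod_eq_emod_of_pos (a := m) (b := 2) (by omega)
      omega
    have hm1 : (if PySem.Int.mod m 2 != 0 then (5:Int) else 6) = 5 ∨
               (if PySem.Int.mod m 2 != 0 then (5:Int) else 6) = 6 := by
      rcases hm2 with h | h
      · exact Or.inr (by rw [h]; decide)
      · exact Or.inl (by rw [h]; decide)
    rw [if_pos hbig]
    rcases hm1 with h | h <;>
      rw [h] <;>
      simp [show ¬ m = 1 by omega, show ¬ m = 2 by omega] <;>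
      decide
  · -- 1 ≤ m ≤ 5
    have hlo : 1 ≤ m := by omega
    have hhi : m ≤ 5 := by omega
    interval_cases m <;> simp [hbig] <;> decide

-- ===== VERDICT (by name: the statement is the Claim_ definition above) =====
theorem flipLights_spec : Claim_equal_flipLights := by
  intro n m _ hpre
  unfold Spec_flipLights
  exact flipLights_spec_aux n m hpre
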